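-- pv_equiv track=rewrite | github.com/youyoubilly/txt-sum | txt_sum/app/summarize.py | get_language_name
-- ===== SOURCE A (Python) =====
-- from typing import Optional, Dict
--
-- LANGUAGE_MAP: Dict[str, str] = {
--     "en": "english",
--     "zh": "chinese",
--     "zh-cn": "chinese",
--     "zh-tw": "traditional chinese",
--     "es": "spanish",
--     "fr": "french",
--     "de": "german",
--     "ja": "japanese",
--     "ko": "korean",
--     "ru": "russian",
--     "pt": "portuguese",
--     "it": "italian",
--     "ar": "arabic",
--     "hi": "hindi",
--     "th": "thai",
--     "vi": "vietnamese",
-- }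
--
-- def get_language_name(lang_code: str) -> str:
--     """Convert language code to full language name.
--
--     Args:
--         lang_code: Language code (e.g., 'en', 'zh') or full name.
--
--     Returns:
--         Full language name for use in prompts.
--     """
--     lang_code_lower = lang_code.lower()
--     # If it's already a full name (not in map), return as is
--     if lang_code_lower not in LANGUAGE_MAP:
--         # Check if it's a reverse lookup (full name provided)
--         for code, name in LANGUAGE_MAP.items():
--             if name.lower() == lang_code_lower:
--                 return name
--         # If not found, assume it's a full name and return as-is
--         return lang_code.lower()
--     return LANGUAGE_MAP[lang_code_lower]
-- ===== SOURCE B (Python) =====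
-- LANGUAGE_MAP = {
--     "en": "english",
--     "zh": "chinese",
--     "zh-cn": "chinese",
--     "zh-tw": "traditional chinese",
--     "es": "spanish",
--     "fr": "french",
--     "de": "german",
--     "ja": "japanese",
--     "ko": "korean",
--     "ru": "russian",
--     "pt": "portuguese",
--     "it": "italian",
--     "ar": "arabic",
--     "hi": "hindi",
--     "th": "thai",
--     "vi": "vietnamese",
-- }
--
-- # One combined table: each code maps to its name, each name maps to itself
-- # (names are already lowercase and do not collide with codes).
-- _COMBINED = {**LANGUAGE_MAP, **{name: name for name in LANGUAGE_MAP.values()}}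
--
-- def get_language_name(lang_code: str) -> str:
--     low = lang_code.lower()
--     return _COMBINED.get(low, low)
-- ===== Notes on version B (the rewrite author's own statement) =====
-- stated objective: simpler
-- what changed: Replaced the membership test, reverse linear scan over the map's items, and passthrough default with a single lookup in one precomputed combined dict mapping codes to names and names to themselves.
import Mathlib
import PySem

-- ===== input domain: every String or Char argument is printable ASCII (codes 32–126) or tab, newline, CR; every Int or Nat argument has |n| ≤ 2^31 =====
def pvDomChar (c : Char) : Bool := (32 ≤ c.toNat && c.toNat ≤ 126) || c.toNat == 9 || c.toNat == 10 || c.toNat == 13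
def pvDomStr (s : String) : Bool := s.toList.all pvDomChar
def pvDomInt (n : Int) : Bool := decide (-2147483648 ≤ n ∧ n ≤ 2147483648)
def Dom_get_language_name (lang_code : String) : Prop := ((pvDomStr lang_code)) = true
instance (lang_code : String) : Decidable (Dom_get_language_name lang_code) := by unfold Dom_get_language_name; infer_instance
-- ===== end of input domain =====

-- B replaces A's membership test + reverse scan + passthrough default with one lookup in a
-- precomputed combined code/name table (objective: simpler).

-- ===== PORT A =====
def LANGUAGE_MAP : PySem.Dict String String := PySem.Dict.ofList
  [("en","english"),("zh","chinese"),("zh-cn","chinese"),("zh-tw","traditional chinese"),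
   ("es","spanish"),("fr","french"),("de","german"),("ja","japanese"),("ko","korean"),
   ("ru","russian"),("pt","portuguese"),("it","italian"),("ar","arabic"),("hi","hindi"),
   ("th","thai"),("vi","vietnamese")]

-- the 'for code, name in LANGUAGE_MAP.items()' loop with its early return
def pvRevScan : List (String × String) → String → Option String
  | [], _ => none
  | (_, name) :: rest, l => if PySem.Str.lower name == l then some name else pvRevScan rest l

def get_language_name (lang_code : String) : String :=
  let lang_code_lower := PySem.Str.lower lang_code
  if (LANGUAGE_MAP.contains lang_code_lower) = false then
    match pvRevScan LANGUAGE_MAP.items lang_code_lower with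
    | some name => name
    | none => lang_code_lower
  else
    -- LANGUAGE_MAP[lang_code_lower]; the guard guarantees the key is present
    (LANGUAGE_MAP.get? lang_code_lower).getD lang_code_lower

-- ===== PORT B =====
def pvCombined : PySem.Dict String String := PySem.Dict.ofList
  [("en","english"),("zh","chinese"),("zh-cn","chinese"),("zh-tw","traditional chinese"),
   ("es","spanish"),("fr","french"),("de","german"),("ja","japanese"),("ko","korean"),
   ("ru","russian"),("pt","portuguese"),("it","italian"),("ar","arabic"),("hi","hindi"),
   ("th","thai"),("vi","vietnamese"),
   ("english","english"),("chinese","chinese"),("traditional chinese","traditional chinese"),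
   ("spanish","spanish"),("french","french"),("german","german"),("japanese","japanese"),
   ("korean","korean"),("russian","russian"),("portuguese","portuguese"),("italian","italian"),
   ("arabic","arabic"),("hindi","hindi"),("thai","thai"),("vietnamese","vietnamese")]

def get_language_name_alt (lang_code : String) : String :=
  let low := PySem.Str.lower lang_code
  pvCombined.getD low low

-- ===== PRECONDITION & SPEC =====
def Spec_get_language_name (lang_code : String) (out : String) : Prop := out = get_language_name_alt lang_code
instance (lang_code : String) (out : String) : Decidable (Spec_get_language_name lang_code out) := by unfold Spec_get_language_name; infer_instance

-- ===== CLAIM (what is proved, stated in full; the proofs are below) =====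
def Claim_equal_get_language_name : Prop := ∀ (lang_code : String), Dom_get_language_name lang_code → Spec_get_language_name lang_code (get_language_name lang_code)

-- ===== LEMMAS AND PROOFS =====

-- the whole equivalence, as a function of the (already lowered) key
set_option maxHeartbeats 1000000 in
theorem pvCore (l : String) :
    (if (LANGUAGE_MAP.contains l) = false then
      match pvRevScan LANGUAGE_MAP.items l with
      | some name => name
      | none => l
    else (LANGUAGE_MAP.get? l).getD l) = pvCombined.getD l l := by
  by_cases h : l ∈ (["en","zh","zh-cn","zh-tw","es","fr","de","ja","ko","ru","pt","it","ar","hi","th","vi","english","chinese","traditional chinese","spanish","french","german","japanese","korean","russian","portuguese","italian","arabic","hindi","thai","vietnamese"] : List String)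
  · simp only [List.mem_cons, List.not_mem_nil, or_false] at h
    rcases h with rfl|rfl|rfl|rfl|rfl|rfl|rfl|rfl|rfl|rfl|rfl|rfl|rfl|rfl|rfl|rfl|rfl|rfl|rfl|rfl|rfl|rfl|rfl|rfl|rfl|rfl|rfl|rfl|rfl|rfl|rfl <;> rfl
  · simp only [List.mem_cons, List.not_mem_nil, or_false, not_or] at h
    simp only [show LANGUAGE_MAP = PySem.Dict.mk [("en","english"),("zh","chinese"),("zh-cn","chinese"),("zh-tw","traditional chinese"),("es","spanish"),("fr","french"),("de","german"),("ja","japanese"),("ko","korean"),("ru","russian"),("pt","portuguese"),("it","italian"),("ar","arabic"),("hi","hindi"),("th","thai"),("vi","vietnamese")] from rfl,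
      show pvCombined = PySem.Dict.mk [("en","english"),("zh","chinese"),("zh-cn","chinese"),("zh-tw","traditional chinese"),("es","spanish"),("fr","french"),("de","german"),("ja","japanese"),("ko","korean"),("ru","russian"),("pt","portuguese"),("it","italian"),("ar","arabic"),("hi","hindi"),("th","thai"),("vi","vietnamese"),("english","english"),("chinese","chinese"),("traditional chinese","traditional chinese"),("spanish","spanish"),("french","french"),("german","german"),("japanese","japanese"),("korean","korean"),("russian","russian"),("portuguese","portuguese"),("italian","italian"),("arabic","arabic"),("hindi","hindi"),("thai","thai"),("vietnamese","vietnamese")] from rfl]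
    simp [pysem, pvRevScan, PySem.Dict.getD, PySem.Dict.contains, PySem.Dict.get?,
      show PySem.Str.lower "english" = "english" from rfl,
      show PySem.Str.lower "chinese" = "chinese" from rfl,
      show PySem.Str.lower "traditional chinese" = "traditional chinese" from rfl,
      show PySem.Str.lower "spanish" = "spanish" from rfl,
      show PySem.Str.lower "french" = "french" from rfl,
      show PySem.Str.lower "german" = "german" from rfl,
      show PySem.Str.lower "japanese" = "japanese" from rfl,
      show PySem.Str.lower "korean" = "korean" from rfl,
      show PySem.Str.lower "russian" = "russian" from rfl,
      show PySem.Str.lower "portuguese" = "portuguese" from rfl,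
      show PySem.Str.lower "italian" = "italian" from rfl,
      show PySem.Str.lower "arabic" = "arabic" from rfl,
      show PySem.Str.lower "hindi" = "hindi" from rfl,
      show PySem.Str.lower "thai" = "thai" from rfl,
      show PySem.Str.lower "vietnamese" = "vietnamese" from rfl,
      Ne.symm h.1,
      Ne.symm h.2.1,
      Ne.symm h.2.2.1,
      Ne.symm h.2.2.2.1,
      Ne.symm h.2.2.2.2.1,
      Ne.symm h.2.2.2.2.2.1,
      Ne.symm h.2.2.2.2.2.2.1,
      Ne.symm h.2.2.2.2.2.2.2.1,
      Ne.symm h.2.2.2.2.2.2.2.2.1,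
      Ne.symm h.2.2.2.2.2.2.2.2.2.1,
      Ne.symm h.2.2.2.2.2.2.2.2.2.2.1,
      Ne.symm h.2.2.2.2.2.2.2.2.2.2.2.1,
      Ne.symm h.2.2.2.2.2.2.2.2.2.2.2.2.1,
      Ne.symm h.2.2.2.2.2.2.2.2.2.2.2.2.2.1,
      Ne.symm h.2.2.2.2.2.2.2.2.2.2.2.2.2.2.1,
      Ne.symm h.2.2.2.2.2.2.2.2.2.2.2.2.2.2.2.1,
      Ne.symm h.2.2.2.2.2.2.2.2.2.2.2.2.2.2.2.2.1,
      Ne.symm h.2.2.2.2.2.2.2.2.2.2.2.2.2.2.2.2.2.1,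
      Ne.symm h.2.2.2.2.2.2.2.2.2.2.2.2.2.2.2.2.2.2.1,
      Ne.symm h.2.2.2.2.2.2.2.2.2.2.2.2.2.2.2.2.2.2.2.1,
      Ne.symm h.2.2.2.2.2.2.2.2.2.2.2.2.2.2.2.2.2.2.2.2.1,
      Ne.symm h.2.2.2.2.2.2.2.2.2.2.2.2.2.2.2.2.2.2.2.2.2.1,
      Ne.symm h.2.2.2.2.2.2.2.2.2.2.2.2.2.2.2.2.2.2.2.2.2.2.1,
      Ne.symm h.2.2.2.2.2.2.2.2.2.2.2.2.2.2.2.2.2.2.2.2.2.2.2.1,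
      Ne.symm h.2.2.2.2.2.2.2.2.2.2.2.2.2.2.2.2.2.2.2.2.2.2.2.2.1,
      Ne.symm h.2.2.2.2.2.2.2.2.2.2.2.2.2.2.2.2.2.2.2.2.2.2.2.2.2.1,
      Ne.symm h.2.2.2.2.2.2.2.2.2.2.2.2.2.2.2.2.2.2.2.2.2.2.2.2.2.2.1,
      Ne.symm h.2.2.2.2.2.2.2.2.2.2.2.2.2.2.2.2.2.2.2.2.2.2.2.2.2.2.2.1,
      Ne.symm h.2.2.2.2.2.2.2.2.2.2.2.2.2.2.2.2.2.2.2.2.2.2.2.2.2.2.2.2.1,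
      Ne.symm h.2.2.2.2.2.2.2.2.2.2.2.2.2.2.2.2.2.2.2.2.2.2.2.2.2.2.2.2.2.1,
      Ne.symm h.2.2.2.2.2.2.2.2.2.2.2.2.2.2.2.2.2.2.2.2.2.2.2.2.2.2.2.2.2.2]

-- ===== VERDICT (by name: the statement is the Claim_ definition above) =====
theorem get_language_name_spec : Claim_equal_get_language_name := by
  intro lang_code _
  unfold Spec_get_language_name get_language_name get_language_name_alt
  exact pvCore (PySem.Str.lower lang_code)
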